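-- pv_equiv track=rewrite | github.com/coall132/OCR-azure_facture | API/fonction_ocr.py | colle_calcul
-- ===== SOURCE A (Python) =====
-- def colle_calcul(a):
--     b=[]
--     nb=''
--     phrase=''
--     error=['XX', ' X ']
--     error2='X'
--     if a is not None:
--         for el in a:
--             if len(el)>0:
--                 while True:
--                     if not el:
--                         break
--                     if len(el)==0:
--                         break
--                     if not el[0].isalnum():
--                         el=el[1:]
--                     else:
--                         break
--                 if el:
--                     if len(el)>0:
--                         if el[0].isdigit():
--                             nb+=' '+el
--                         elif error[0] not in el and error[1] not in el and el!=error2: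
--                             phrase+=' '+el
--         b.append(phrase)
--         b.append(nb)
--     else:
--         b=None
--     return b
-- ===== SOURCE B (Python) =====
-- def _strip_lead(el):
--     # drop leading non-alphanumeric chars by locating the first alnum char
--     idx = next((i for i, ch in enumerate(el) if ch.isalnum()), len(el))
--     return el[idx:]
--
-- def colle_calcul(a):
--     if a is None:
--         return None
--     cleaned = [_strip_lead(el) for el in a]
--     nb = ''.join(' ' + el for el in cleaned if el and el[0].isdigit())
--     phrase = ''.join(' ' + el for el in cleaned
--                      if el and not el[0].isdigit()
--                      and 'XX' not in el and ' X ' not in el and el != 'X')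
--     return [phrase, nb]
-- ===== Notes on version B (the rewrite author's own statement) =====
-- stated objective: simpler
-- what changed: Replaces A's single fused loop (char-by-char while-strip plus in-place classification into two string accumulators) with one stripping pass (index of first alnum char, then slice) followed by two independent filtered joins.
import Mathlib
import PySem

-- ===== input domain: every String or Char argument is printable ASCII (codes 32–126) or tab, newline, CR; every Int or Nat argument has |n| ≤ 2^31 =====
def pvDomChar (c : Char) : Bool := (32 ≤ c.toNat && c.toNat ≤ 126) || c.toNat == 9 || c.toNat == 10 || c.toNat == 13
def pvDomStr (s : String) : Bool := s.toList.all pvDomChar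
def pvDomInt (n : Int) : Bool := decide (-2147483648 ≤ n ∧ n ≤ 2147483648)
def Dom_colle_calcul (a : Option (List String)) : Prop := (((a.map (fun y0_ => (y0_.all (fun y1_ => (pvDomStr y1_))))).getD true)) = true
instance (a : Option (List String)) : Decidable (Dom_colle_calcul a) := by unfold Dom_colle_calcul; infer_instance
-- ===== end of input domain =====

-- B replaces A's fused strip-and-classify accumulator loop by one stripping map
-- followed by two filtered joins (objective: simpler decomposition, same cost).

-- ===== PORT A =====
-- the 'while True' leading-strip loop of A: drop chars until el is empty or el[0].isalnum()
def pvStripA : List Char → List Char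
  | [] => []
  | c :: cs => if ¬ PySem.Chars.isalnum c then pvStripA cs else c :: cs

-- one iteration of A's for-loop body, acting on the (phrase, nb) accumulators
def pvStepA (acc : List Char × List Char) (el : String) : List Char × List Char :=
  if (PySem.Str.len el) > 0 then
    match pvStripA el.toList with
    | [] => acc
    | c :: rest =>
      if (c :: rest).length > 0 then
        if PySem.Chars.isdigit c then (acc.1, acc.2 ++ (' ' :: c :: rest))
        else if ¬ (PySem.Chars.isIn ['X','X'] (c :: rest)) ∧
                ¬ (PySem.Chars.isIn [' ','X',' '] (c :: rest)) ∧
                (c :: rest) ≠ ['X'] then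
          (acc.1 ++ (' ' :: c :: rest), acc.2)
        else acc
      else acc
  else acc

def colle_calcul (a : Option (List String)) : Option (List String) :=
  match a with
  | none => none
  | some l =>
    let res := l.foldl pvStepA ([], [])
    some [String.ofList res.1, String.ofList res.2]

-- ===== PORT B =====
-- B's _strip_lead: index of the first alnum char, then slice from there
def pvStripB (cs : List Char) : List Char :=
  cs.drop (cs.findIdx (fun c => PySem.Chars.isalnum c))

def pvDigitHead : List Char → Bool
  | [] => false
  | c :: _ => PySem.Chars.isdigit c

def pvPhraseKeep (cs : List Char) : Bool :=
  match cs with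
  | [] => false
  | c :: _ =>
    !PySem.Chars.isdigit c && !PySem.Chars.isIn ['X','X'] cs &&
    !PySem.Chars.isIn [' ','X',' '] cs && cs ≠ ['X']

def colle_calcul_alt (a : Option (List String)) : Option (List String) :=
  match a with
  | none => none
  | some l =>
    let cleaned := l.map (fun el => pvStripB el.toList)
    let nb := ((cleaned.filter pvDigitHead).map (fun cs => ' ' :: cs)).flatten
    let phrase := ((cleaned.filter pvPhraseKeep).map (fun cs => ' ' :: cs)).flatten
    some [String.ofList phrase, String.ofList nb]

-- ===== PRECONDITION & SPEC =====
def Spec_colle_calcul (a : Option (List String)) (out : Option (List String)) : Prop := out = colle_calcul_alt a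
instance (a : Option (List String)) (out : Option (List String)) : Decidable (Spec_colle_calcul a out) := by unfold Spec_colle_calcul; infer_instance

-- ===== CLAIM (what is proved, stated in full; the proofs are below) =====
def Claim_equal_colle_calcul : Prop := ∀ (a : Option (List String)), Dom_colle_calcul a → Spec_colle_calcul a (colle_calcul a)

-- ===== LEMMAS AND PROOFS =====
theorem pvStrip_eq (cs : List Char) : pvStripA cs = pvStripB cs := by
  induction cs with
  | nil => rfl
  | cons c cs ih =>
    simp only [pvStripA, pvStripB, List.findIdx_cons]
    by_cases h : PySem.Chars.isalnum c = true
    · simp [h]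
    · simp [h, ih, pvStripB]

theorem pvFoldA_eq (l : List String) (p n : List Char) :
    l.foldl pvStepA (p, n) =
      (p ++ ((l.map (fun el => pvStripB el.toList) |>.filter pvPhraseKeep).map
              (fun cs => ' ' :: cs)).flatten,
       n ++ ((l.map (fun el => pvStripB el.toList) |>.filter pvDigitHead).map
              (fun cs => ' ' :: cs)).flatten) := by
  induction l generalizing p n with
  | nil => simp
  | cons el l ih =>
    have hstep : pvStepA (p, n) el =
        (p ++ (if pvPhraseKeep (pvStripB el.toList) then ' ' :: pvStripB el.toList else []),
         n ++ (if pvDigitHead (pvStripB el.toList) then ' ' :: pvStripB el.toList else [])) := by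
      simp only [pvStepA, pvStrip_eq, PySem.Str.len_eq]
      by_cases hlen : (0:Int) < el.toList.length
      · simp only [if_pos hlen]
        cases hs : pvStripB el.toList with
        | nil => simp [pvPhraseKeep, pvDigitHead]
        | cons c rest =>
          simp only [List.length_cons, pvDigitHead, pvPhraseKeep]
          by_cases hd : PySem.Chars.isdigit c = true
          · simp [hd]
          · simp only [hd]
            by_cases h1 : PySem.Chars.isIn ['X','X'] (c :: rest) = true <;>
            by_cases h2 : PySem.Chars.isIn [' ','X',' '] (c :: rest) = true <;>
            by_cases h3 : (c :: rest) = ['X'] <;>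
            simp_all
      · have hnil : el.toList = [] := List.eq_nil_of_length_eq_zero (by omega)
        simp [hnil, pvStripB, pvPhraseKeep, pvDigitHead]
    simp only [List.foldl_cons, hstep, ih, List.map_cons, List.filter_cons]
    by_cases hp : pvPhraseKeep (pvStripB el.toList) = true <;>
    by_cases hn : pvDigitHead (pvStripB el.toList) = true <;>
    simp [hp, hn]

-- ===== VERDICT (by name: the statement is the Claim_ definition above) =====
theorem colle_calcul_spec : Claim_equal_colle_calcul := by
  intro a _
  unfold Spec_colle_calcul
  cases a with
  | none => rfl
  | some l =>
    simp only [colle_calcul, colle_calcul_alt, pvFoldA_eq l [] []]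
    simp
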